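-- pv_equiv track=rewrite | github.com/KuboBahyl/coding-interviews | Algo problems/Advanced/LargestConnectedGrid.py | largest_component
-- ===== SOURCE A (Python) =====
-- grid = [
--     [1, 2, 2, 2],
--     [1, 3, 3, 2],
--     [1, 3, 2, 2],
-- ]
--
-- def largest_component(grid):
--     def can_move(i, j, visited, value):
--         if i < 0 or i > M - 1:
--             return False
--         if j < 0 or j > N - 1:
--             return False
--         if visited[i][j]:
--             return False
--         if grid[i][j] != value:
--             return False
--         return True
--
--     def search(i, j, visited, area=1):
--         visited[i][j] = True
--         value = grid[i][j]
--
--         if can_move(i - 1, j, visited, value):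
--             area, visited = search(i - 1, j, visited, area + 1)
--         if can_move(i, j + 1, visited, value):
--             area, visited = search(i, j + 1, visited, area + 1)
--         if can_move(i + 1, j, visited, value):
--             area, visited = search(i + 1, j, visited, area + 1)
--         if can_move(i, j - 1, visited, value):
--             area, visited = search(i, j - 1, visited, area + 1)
--
--         return area, visited
--
--     M = len(grid)
--     if M == 0:
--         return 0
--
--     N = len(grid[0])
--     if N == 0:
--         return 0
--
--     # M, N > 0
--     visited = [[False] * N for x in range(M)]
--     max_area = 0
--
--     for i in range(M):
--         for j in range(N):
--             if not visited[i][j]: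
--                 area, visited = search(i, j, visited)
--                 if area > max_area:
--                     max_area = area
--
--     return max_area
-- ===== SOURCE B (Python) =====
-- def largest_component(grid):
--     M = len(grid)
--     if M == 0:
--         return 0
--     N = len(grid[0])
--     if N == 0:
--         return 0
--
--     visited = [[False] * N for _ in range(M)]
--     max_area = 0
--
--     for i in range(M):
--         for j in range(N):
--             if not visited[i][j]:
--                 value = grid[i][j]
--                 area = 0
--                 stack = [(i, j)]
--                 while stack:
--                     p, q = stack.pop()
--                     if 0 <= p < M and 0 <= q < N and not visited[p][q] and grid[p][q] == value:
--                         visited[p][q] = True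
--                         area += 1
--                         stack.append((p, q - 1))
--                         stack.append((p + 1, q))
--                         stack.append((p, q + 1))
--                         stack.append((p - 1, q))
--                 max_area = max(max_area, area)
--
--     return max_area
-- ===== Notes on version B (the rewrite author's own statement) =====
-- stated objective: alternative
-- what changed: A's recursive depth-first search is replaced by an iterative flood fill that maintains an explicit stack of cells to visit (pop, check bounds/visited/value, mark, push the four neighbours), keeping the outer double loop; no call-stack recursion remains.
import Mathlib
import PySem

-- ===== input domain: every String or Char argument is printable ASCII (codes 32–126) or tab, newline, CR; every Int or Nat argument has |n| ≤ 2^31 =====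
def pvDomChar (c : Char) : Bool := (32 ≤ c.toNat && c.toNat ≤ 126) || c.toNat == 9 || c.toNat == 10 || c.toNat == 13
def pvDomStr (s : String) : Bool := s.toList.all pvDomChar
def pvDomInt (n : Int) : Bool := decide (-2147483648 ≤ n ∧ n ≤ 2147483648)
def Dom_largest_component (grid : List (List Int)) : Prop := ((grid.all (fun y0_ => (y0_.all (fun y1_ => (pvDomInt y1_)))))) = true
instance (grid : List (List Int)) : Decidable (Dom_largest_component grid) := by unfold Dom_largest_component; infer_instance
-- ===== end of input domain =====

-- B replaces A's recursive depth-first `search` by an iterative flood fill over an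
-- explicit stack (same outer loops); equivalence is about the return value only
-- (each Python version also mutates its local `visited`, which no caller observes).

-- Shared 2D-indexing helpers (used only at indices the guards have already checked,
-- where they are exact for Python's visited[i][j] / grid[i][j]).
def pvCell (v : List (List Bool)) (i j : Nat) : Bool := (v.getD i []).getD j false
def pvMark (v : List (List Bool)) (i j : Nat) : List (List Bool) := v.set i ((v.getD i []).set j true)
def pvVal (g : List (List Int)) (i j : Nat) : Int := (g.getD i []).getD j 0

-- number of still-unvisited cells (termination measure of the flood fill / fuel bound of the recursion)
def pvCF (v : List (List Bool)) : Nat := (v.map (fun r => r.count false)).sum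

-- ===== PORT A =====
-- can_move: the four checks in Python's order (visited/grid are only read after the
-- bounds checks succeeded, so 0 ≤ i, 0 ≤ j there and .toNat is exact).
def pvCanMove (g : List (List Int)) (i j : Int) (v : List (List Bool)) (value : Int) : Bool :=
  if i < 0 || (g.length : Int) - 1 < i then false
  else if j < 0 || ((g.headD []).length : Int) - 1 < j then false
  else if pvCell v i.toNat j.toNat then false
  else if pvVal g i.toNat j.toNat != value then false
  else true

-- search: literal port of A's recursion; the Nat fuel is only a totality guard
-- (the top-level call supplies fuel ≥ number of unvisited cells, so `0` is never hit).
def pvSearch (g : List (List Int)) : Nat → Int → Int → List (List Bool) → Int → Int × List (List Bool)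
  | 0, _, _, v, a => (a, v)
  | f+1, i, j, v, a =>
    let v1 := pvMark v i.toNat j.toNat
    let value := pvVal g i.toNat j.toNat
    let r1 := if pvCanMove g (i-1) j v1 value then pvSearch g f (i-1) j v1 (a+1) else (a, v1)
    let r2 := if pvCanMove g i (j+1) r1.2 value then pvSearch g f i (j+1) r1.2 (r1.1+1) else r1
    let r3 := if pvCanMove g (i+1) j r2.2 value then pvSearch g f (i+1) j r2.2 (r2.1+1) else r2
    if pvCanMove g i (j-1) r3.2 value then pvSearch g f i (j-1) r3.2 (r3.1+1) else r3

def largest_component (grid : List (List Int)) : Int :=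
  let M : Int := grid.length
  if M = 0 then 0 else
  let N : Int := (grid.headD []).length
  if N = 0 then 0 else
  let visited : List (List Bool) := List.replicate grid.length (List.replicate (grid.headD []).length false)
  let r := (PySem.List.pyRange 0 M 1).foldl (fun st i =>
      (PySem.List.pyRange 0 N 1).foldl (fun (st : Int × List (List Bool)) j =>
        if ! pvCell st.2 i.toNat j.toNat then
          let r := pvSearch grid (grid.length * (grid.headD []).length) i j st.2 1
          ((if r.1 > st.1 then r.1 else st.1), r.2)
        else st) st) ((0 : Int), visited)
  r.1

-- ===== PORT B =====
-- termination helper for the flood-fill loop (cited by its decreasing_by)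
theorem pvCF_row_set_eq (row : List Bool) (j : Nat) (hj : j < row.length) (hf : row[j] = false) :
    (row.set j true).count false + 1 = row.count false := by
  induction row generalizing j with
  | nil => simp at hj
  | cons x xs ih =>
    cases j with
    | zero => simp at hf; subst hf; simp
    | succ j =>
      simp only [List.set_cons_succ, List.count_cons]
      have := ih j (by simpa using hj) (by simpa using hf)
      omega

theorem pvCF_mark_eq (v : List (List Bool)) (i j : Nat) (hi : i < v.length)
    (hj : j < v[i].length) (hf : v[i][j] = false) :
    pvCF (pvMark v i j) + 1 = pvCF v := by
  induction v generalizing i with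
  | nil => simp at hi
  | cons r t ih =>
    cases i with
    | zero =>
      simp only [pvMark, List.getD_cons_zero, List.set_cons_zero, pvCF, List.map_cons, List.sum_cons]
      have := pvCF_row_set_eq r j (by simpa using hj) (by simpa using hf)
      omega
    | succ i =>
      simp only [pvMark, List.getD_cons_succ, List.set_cons_succ, pvCF, List.map_cons, List.sum_cons]
      have := ih i (by simpa using hi) (by simpa using hj) (by simpa using hf)
      simp only [pvMark, pvCF] at this
      omega

theorem pvCF_mark_lt (v : List (List Bool)) (i j : Nat)
    (h : (v.getD i [])[j]? = some false) : pvCF (pvMark v i j) < pvCF v := by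
  have hi : i < v.length := by
    by_contra hlen
    rw [List.getD_eq_getElem?_getD, List.getElem?_eq_none (Nat.le_of_not_lt hlen)] at h
    simp at h
  have hrow : v.getD i [] = v[i] := by
    rw [List.getD_eq_getElem?_getD, List.getElem?_eq_getElem hi]; rfl
  rw [hrow, List.getElem?_eq_some_iff] at h
  obtain ⟨hj, hf⟩ := h
  have := pvCF_mark_eq v i j hi hj hf
  omega

-- flood fill with an explicit stack; pops come in A's neighbour order (up, right, down, left).
-- the dependent `if h :` on visited[p][q] is Python's `not visited[p][q]` (visited is always M×N here).
def pvFlood (g : List (List Int)) (value : Int) : List (Int × Int) → List (List Bool) → Int → Int × List (List Bool)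
  | [], v, a => (a, v)
  | (i, j) :: rest, v, a =>
    if i < 0 ∨ (g.length : Int) - 1 < i ∨ j < 0 ∨ ((g.headD []).length : Int) - 1 < j then
      pvFlood g value rest v a
    else if h : (v.getD i.toNat [])[j.toNat]? = some false then
      if pvVal g i.toNat j.toNat = value then
        pvFlood g value ((i-1,j) :: (i,j+1) :: (i+1,j) :: (i,j-1) :: rest) (pvMark v i.toNat j.toNat) (a+1)
      else pvFlood g value rest v a
    else pvFlood g value rest v a
  termination_by stack v _ => 4 * pvCF v + stack.length
  decreasing_by
  · simp only [List.length_cons]; omega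
  · have := pvCF_mark_lt v i.toNat j.toNat h
    simp only [List.length_cons]; omega
  · simp only [List.length_cons]; omega
  · simp only [List.length_cons]; omega

def largest_component_alt (grid : List (List Int)) : Int :=
  let M : Int := grid.length
  if M = 0 then 0 else
  let N : Int := (grid.headD []).length
  if N = 0 then 0 else
  let visited : List (List Bool) := List.replicate grid.length (List.replicate (grid.headD []).length false)
  let r := (PySem.List.pyRange 0 M 1).foldl (fun st i =>
      (PySem.List.pyRange 0 N 1).foldl (fun (st : Int × List (List Bool)) j =>
        if ! pvCell st.2 i.toNat j.toNat then
          let r := pvFlood grid (pvVal grid i.toNat j.toNat) [(i, j)] st.2 0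
          (max st.1 r.1, r.2)
        else st) st) ((0 : Int), visited)
  r.1

-- ===== PRECONDITION & SPEC =====
-- Pre_ excludes only grids on which the Python A raises IndexError: a row shorter than
-- row 0, some of whose missing cells the loops index (both loops use j < len(grid[0])).
def Pre_largest_component (grid : List (List Int)) : Prop :=
  ∀ row ∈ grid, (grid.headD []).length ≤ row.length
instance (grid : List (List Int)) : Decidable (Pre_largest_component grid) := by unfold Pre_largest_component; infer_instance
def pvWitness_largest_component : List (List Int) := [[1, 2, 2], [1, 3, 2], [1, 3, 3]]

def Spec_largest_component (grid : List (List Int)) (out : Int) : Prop := out = largest_component_alt grid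
instance (grid : List (List Int)) (out : Int) : Decidable (Spec_largest_component grid out) := by unfold Spec_largest_component; infer_instance

-- ===== CLAIM (what is proved, stated in full; the proofs are below) =====
def Claim_equal_largest_component : Prop := ∀ (grid : List (List Int)), Dom_largest_component grid → Pre_largest_component grid → Spec_largest_component grid (largest_component grid)

-- ===== LEMMAS AND PROOFS =====

-- `visited` always stays a (len grid) × (len grid[0]) table
def pvShape (g : List (List Int)) (v : List (List Bool)) : Prop :=
  v.length = g.length ∧ ∀ r ∈ v, r.length = (g.headD []).length

theorem pvShape_mark (g : List (List Int)) (v : List (List Bool)) (i j : Nat)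
    (hs : pvShape g v) (hi : i < v.length) : pvShape g (pvMark v i j) := by
  obtain ⟨h1, h2⟩ := hs
  refine ⟨by simp [pvMark, h1], ?_⟩
  intro r hr
  rcases List.mem_or_eq_of_mem_set hr with hm | rfl
  · exact h2 r hm
  · have hrow : v.getD i [] = v[i] := by
      rw [List.getD_eq_getElem?_getD, List.getElem?_eq_getElem hi]; rfl
    rw [hrow, List.length_set]
    exact h2 _ (List.getElem_mem hi)

theorem pvCF_row_set_le (row : List Bool) (j : Nat) :
    (row.set j true).count false ≤ row.count false := by
  induction row generalizing j with
  | nil => simp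
  | cons x xs ih =>
    cases j with
    | zero => cases x <;> simp
    | succ j => simp only [List.set_cons_succ, List.count_cons]; have := ih j; omega

theorem pvCF_mark_le (v : List (List Bool)) (i j : Nat) : pvCF (pvMark v i j) ≤ pvCF v := by
  induction v generalizing i with
  | nil => simp [pvMark]
  | cons r t ih =>
    cases i with
    | zero =>
      simp only [pvMark, List.getD_cons_zero, List.set_cons_zero, pvCF, List.map_cons, List.sum_cons]
      have := pvCF_row_set_le r j
      omega
    | succ i =>
      simp only [pvMark, List.getD_cons_succ, List.set_cons_succ, pvCF, List.map_cons, List.sum_cons]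
      have := ih i
      simp only [pvMark, pvCF] at this
      omega

-- what a successful can_move means
theorem pvCanMove_elim {g : List (List Int)} {i j : Int} {v : List (List Bool)} {value : Int}
    (h : pvCanMove g i j v value = true) :
    0 ≤ i ∧ i < (g.length : Int) ∧ 0 ≤ j ∧ j < ((g.headD []).length : Int) ∧
    pvCell v i.toNat j.toNat = false ∧ pvVal g i.toNat j.toNat = value := by
  unfold pvCanMove at h
  split_ifs at h with h1 h2 h3 h4
  simp only [Bool.or_eq_true, decide_eq_true_eq, not_or] at h1 h2
  simp only [Bool.not_eq_true] at h3
  simp only [bne_iff_ne, ne_eq, not_not] at h4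
  exact ⟨by omega, by omega, by omega, by omega, h3, h4⟩

theorem pvCanMove_intro {g : List (List Int)} {i j : Int} {v : List (List Bool)} {value : Int}
    (h1 : 0 ≤ i) (h2 : i < (g.length : Int)) (h3 : 0 ≤ j) (h4 : j < ((g.headD []).length : Int))
    (h5 : pvCell v i.toNat j.toNat = false) (h6 : pvVal g i.toNat j.toNat = value) :
    pvCanMove g i j v value = true := by
  unfold pvCanMove
  split_ifs with c1 c2 c3 c4
  · simp only [Bool.or_eq_true, decide_eq_true_eq] at c1; omega
  · simp only [Bool.or_eq_true, decide_eq_true_eq] at c2; omega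
  · rw [h5] at c3; exact absurd c3 (by simp)
  · rw [h6] at c4; simp at c4
  · rfl

-- under the shape invariant, the flood fill's visited[p][q] read agrees with pvCell
theorem pvCell_some (g : List (List Int)) (v : List (List Bool)) (i j : Nat)
    (hs : pvShape g v) (hi : i < g.length) (hj : j < (g.headD []).length) :
    (v.getD i [])[j]? = some (pvCell v i j) := by
  obtain ⟨h1, h2⟩ := hs
  have hiv : i < v.length := by omega
  have hrow : v.getD i [] = v[i] := by
    rw [List.getD_eq_getElem?_getD, List.getElem?_eq_getElem hiv]; rfl
  have hlen : v[i].length = (g.headD []).length := h2 _ (List.getElem_mem hiv)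
  rw [pvCell, hrow, List.getElem?_eq_getElem (by omega), List.getD_eq_getElem?_getD,
    List.getElem?_eq_getElem (by omega)]
  rfl

theorem pvCF_mark_eq' (g : List (List Int)) (v : List (List Bool)) (i j : Int) (value : Int)
    (hs : pvShape g v) (h : pvCanMove g i j v value = true) :
    pvCF (pvMark v i.toNat j.toNat) + 1 = pvCF v := by
  obtain ⟨_, hiM, _, hjN, hcell, _⟩ := pvCanMove_elim h
  have hlen1 : v.length = g.length := hs.1
  have hiv : i.toNat < v.length := by omega
  have hlen : v[i.toNat].length = (g.headD []).length := hs.2 _ (List.getElem_mem hiv)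
  have hrow : v.getD i.toNat [] = v[i.toNat] := by
    rw [List.getD_eq_getElem?_getD, List.getElem?_eq_getElem hiv]; rfl
  have hjr : j.toNat < v[i.toNat].length := by rw [hlen]; omega
  apply pvCF_mark_eq v i.toNat j.toNat hiv hjr
  have : pvCell v i.toNat j.toNat = v[i.toNat][j.toNat] := by
    rw [pvCell, hrow, List.getD_eq_getElem?_getD, List.getElem?_eq_getElem hjr]; rfl
  rw [← this, hcell]

theorem pvCF_pos (g : List (List Int)) (v : List (List Bool)) (i j : Int) (value : Int)
    (hs : pvShape g v) (h : pvCanMove g i j v value = true) : 0 < pvCF v := by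
  have := pvCF_mark_eq' g v i j value hs h
  omega

-- pvSearch can only mark cells, never unmark
theorem pvSearch_cf_le (g : List (List Int)) : ∀ (f : Nat) (i j : Int) (v : List (List Bool)) (a : Int),
    pvCF (pvSearch g f i j v a).2 ≤ pvCF v := by
  intro f
  induction f with
  | zero => intro i j v a; simp [pvSearch]
  | succ f ih =>
    intro i j v a
    simp only [pvSearch]
    have step : ∀ (p q : Int) (w : List (List Bool)) (b : Int),
        pvCF (if pvCanMove g p q w (pvVal g i.toNat j.toNat) then pvSearch g f p q w (b+1) else (b, w)).2
          ≤ pvCF w := by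
      intro p q w b; split
      · exact ih p q w (b+1)
      · exact le_rfl
    refine le_trans (step _ _ _ _) (le_trans (step _ _ _ _) (le_trans (step _ _ _ _)
      (le_trans (step _ _ _ _) (pvCF_mark_le v i.toNat j.toNat))))

-- pvSearch keeps visited an M × N table (the entry row index is in range at every call site)
theorem pvSearch_shape (g : List (List Int)) : ∀ (f : Nat) (i j : Int) (v : List (List Bool)) (a : Int),
    pvShape g v → i.toNat < v.length → pvShape g (pvSearch g f i j v a).2 := by
  intro f
  induction f with
  | zero => intro i j v a hs _; simpa [pvSearch] using hs
  | succ f ih =>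
    intro i j v a hs hi
    simp only [pvSearch]
    have step : ∀ (p q : Int) (w : List (List Bool)) (b : Int), pvShape g w →
        pvShape g (if pvCanMove g p q w (pvVal g i.toNat j.toNat) then pvSearch g f p q w (b+1) else (b, w)).2 := by
      intro p q w b hw; split
      · rename_i hcm
        obtain ⟨hp0, hpM, _, _, _, _⟩ := pvCanMove_elim hcm
        exact ih p q w (b+1) hw (by have := hw.1; omega)
      · exact hw
    exact step _ _ _ _ (step _ _ _ _ (step _ _ _ _ (step _ _ _ _
      (pvShape_mark g v i.toNat j.toNat hs hi))))

-- a cell the recursion would not enter is popped and skipped by the flood fill too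
theorem pvFlood_skip (g : List (List Int)) (value : Int) (i j : Int) (rest : List (Int × Int))
    (v : List (List Bool)) (a : Int) (hs : pvShape g v) (h : pvCanMove g i j v value = false) :
    pvFlood g value ((i, j) :: rest) v a = pvFlood g value rest v a := by
  rw [pvFlood]
  by_cases hb : i < 0 ∨ (g.length : Int) - 1 < i ∨ j < 0 ∨ ((g.headD []).length : Int) - 1 < j
  · rw [if_pos hb]
  · rw [if_neg hb]
    simp only [not_or] at hb
    obtain ⟨hi0, hiM, hj0, hjN⟩ := hb
    have hcell := pvCell_some g v i.toNat j.toNat hs (by omega) (by omega)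
    by_cases hv : pvCell v i.toNat j.toNat
    · rw [dif_neg (by rw [hcell, hv]; simp)]
    · rw [Bool.not_eq_true] at hv
      rw [dif_pos (by rw [hcell, hv])]
      rw [if_neg]
      intro hval
      have hcm : pvCanMove g i j v value = true :=
        pvCanMove_intro (by omega) (by omega) (by omega) (by omega) hv hval
      rw [hcm] at h
      exact absurd h (by simp)

-- the bisimulation: popping a movable cell runs A's `search` on it
theorem pvFlood_search (g : List (List Int)) (value : Int) : ∀ (cf : Nat) (v : List (List Bool)),
    pvCF v ≤ cf → pvShape g v → ∀ (i j : Int), pvCanMove g i j v value = true →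
    ∀ (f : Nat), pvCF v ≤ f → ∀ (rest : List (Int × Int)) (a : Int),
    pvFlood g value ((i, j) :: rest) v a =
      pvFlood g value rest (pvSearch g f i j v (a+1)).2 (pvSearch g f i j v (a+1)).1 := by
  intro cf
  induction cf with
  | zero =>
    intro v hcf hs i j hcm
    exact absurd (pvCF_pos g v i j value hs hcm) (by omega)
  | succ cf ih =>
    intro v hcf hs i j hcm f hf rest a
    obtain ⟨hi0, hiM, hj0, hjN, hcell, hval⟩ := pvCanMove_elim hcm
    have hcfpos : 0 < pvCF v := pvCF_pos g v i j value hs hcm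
    obtain ⟨f0, rfl⟩ : ∃ f0, f = f0 + 1 := ⟨f - 1, by omega⟩
    have hcsome := pvCell_some g v i.toNat j.toNat hs (by omega) (by omega)
    -- left side: pop (i,j), mark it, push the four neighbours
    rw [pvFlood, if_neg (by omega), dif_pos (by rw [hcsome, hcell]), if_pos hval]
    -- right side: unfold one level of the recursion
    simp only [pvSearch]
    rw [hval]
    have hs1 : pvShape g (pvMark v i.toNat j.toNat) := pvShape_mark g v _ _ hs (by have := hs.1; omega)
    have hc1 : pvCF (pvMark v i.toNat j.toNat) + 1 = pvCF v := pvCF_mark_eq' g v i j value hs hcm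
    -- one neighbour step, shared by the four directions
    have step : ∀ (p q : Int) (w : List (List Bool)) (b : Int) (T : List (Int × Int)),
        pvShape g w → pvCF w ≤ cf → pvCF w ≤ f0 →
        pvFlood g value ((p, q) :: T) w b =
          pvFlood g value T
            (if pvCanMove g p q w value then pvSearch g f0 p q w (b+1) else (b, w)).2
            (if pvCanMove g p q w value then pvSearch g f0 p q w (b+1) else (b, w)).1 := by
      intro p q w b T hw hwcf hwf
      by_cases hc : pvCanMove g p q w value
      · rw [if_pos hc]
        exact ih w hwcf hw p q hc f0 hwf T b
      · rw [if_neg hc]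
        exact pvFlood_skip g value p q T w b hw (by simpa using hc)
    have stepSh : ∀ (p q : Int) (w : List (List Bool)) (b : Int), pvShape g w →
        pvShape g (if pvCanMove g p q w value then pvSearch g f0 p q w (b+1) else (b, w)).2 := by
      intro p q w b hw; split
      · rename_i hcm'
        obtain ⟨hp0, hpM, _, _, _, _⟩ := pvCanMove_elim hcm'
        exact pvSearch_shape g f0 p q w (b+1) hw (by have := hw.1; omega)
      · exact hw
    have stepCF : ∀ (p q : Int) (w : List (List Bool)) (b : Int),
        pvCF (if pvCanMove g p q w value then pvSearch g f0 p q w (b+1) else (b, w)).2 ≤ pvCF w := by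
      intro p q w b; split
      · exact pvSearch_cf_le g f0 p q w (b+1)
      · exact le_rfl
    rw [step (i-1) j (pvMark v i.toNat j.toNat) (a+1) _ hs1 (by omega) (by omega)]
    set R1 := if pvCanMove g (i-1) j (pvMark v i.toNat j.toNat) value
        then pvSearch g f0 (i-1) j (pvMark v i.toNat j.toNat) (a+1+1)
        else (a+1, pvMark v i.toNat j.toNat) with hR1
    have h1s : pvShape g R1.2 := by rw [hR1]; exact stepSh _ _ _ _ hs1
    have h1cf : pvCF R1.2 ≤ pvCF (pvMark v i.toNat j.toNat) := by rw [hR1]; exact stepCF _ _ _ _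
    rw [step i (j+1) R1.2 R1.1 _ h1s (by omega) (by omega)]
    set R2 := if pvCanMove g i (j+1) R1.2 value
        then pvSearch g f0 i (j+1) R1.2 (R1.1+1)
        else (R1.1, R1.2) with hR2
    have h2s : pvShape g R2.2 := by rw [hR2]; exact stepSh _ _ _ _ h1s
    have h2cf : pvCF R2.2 ≤ pvCF R1.2 := by rw [hR2]; exact stepCF _ _ _ _
    rw [step (i+1) j R2.2 R2.1 _ h2s (by omega) (by omega)]
    set R3 := if pvCanMove g (i+1) j R2.2 value
        then pvSearch g f0 (i+1) j R2.2 (R2.1+1)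
        else (R2.1, R2.2) with hR3
    have h3s : pvShape g R3.2 := by rw [hR3]; exact stepSh _ _ _ _ h2s
    have h3cf : pvCF R3.2 ≤ pvCF R2.2 := by rw [hR3]; exact stepCF _ _ _ _
    rw [step i (j-1) R3.2 R3.1 _ h3s (by omega) (by omega)]

-- fold congruence under an invariant
theorem pvFoldl_congr_inv {α σ : Type} (P : σ → Prop) (f h : σ → α → σ) (l : List α) (s : σ)
    (hP : P s) (hpres : ∀ s a, a ∈ l → P s → P (f s a))
    (hcong : ∀ s a, a ∈ l → P s → f s a = h s a) : l.foldl f s = l.foldl h s := by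
  induction l generalizing s with
  | nil => rfl
  | cons x xs ih =>
      simp only [List.foldl_cons]
      rw [← hcong s x (by simp) hP]
      exact ih (f s x) (hpres s x (by simp) hP)
        (fun s a ha hPs => hpres s a (List.mem_cons_of_mem _ ha) hPs)
        (fun s a ha hPs => hcong s a (List.mem_cons_of_mem _ ha) hPs)

theorem pvFoldl_inv {α σ : Type} (P : σ → Prop) (f : σ → α → σ) (l : List α) (s : σ)
    (hP : P s) (hpres : ∀ s a, a ∈ l → P s → P (f s a)) : P (l.foldl f s) := by
  induction l generalizing s with
  | nil => exact hP
  | cons x xs ih =>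
      exact ih (f s x) (hpres s x (by simp) hP)
        (fun s a ha hPs => hpres s a (List.mem_cons_of_mem _ ha) hPs)

theorem pvCF_le_rows (v : List (List Bool)) (n : Nat) (h : ∀ r ∈ v, r.length = n) :
    pvCF v ≤ v.length * n := by
  induction v with
  | nil => simp [pvCF]
  | cons r t ih =>
    have h1 : r.count false ≤ n := by
      rw [← h r (by simp)]; exact List.count_le_length
    have h2 := ih (fun r hr => h r (List.mem_cons_of_mem _ hr))
    simp only [pvCF, List.map_cons, List.sum_cons, List.length_cons] at *
    calc r.count false + (t.map fun r => r.count false).sum ≤ n + t.length * n := by omega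
      _ = (t.length + 1) * n := by ring

theorem pvCF_le_size (g : List (List Int)) (v : List (List Bool)) (hs : pvShape g v) :
    pvCF v ≤ g.length * (g.headD []).length := by
  have h := pvCF_le_rows v (g.headD []).length hs.2
  rw [hs.1] at h
  exact h

theorem pvFlood_nil (g : List (List Int)) (value : Int) (v : List (List Bool)) (a : Int) :
    pvFlood g value [] v a = (a, v) := by
  rw [pvFlood]

-- ===== VERDICT (by name: the statement is the Claim_ definition above) =====
theorem largest_component_spec : Claim_equal_largest_component := by
  intro grid _dom _pre
  unfold Spec_largest_component largest_component largest_component_alt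
  dsimp only
  by_cases hM : (grid.length : Int) = 0
  · rw [if_pos hM, if_pos hM]
  rw [if_neg hM, if_neg hM]
  by_cases hN : ((grid.headD []).length : Int) = 0
  · rw [if_pos hN, if_pos hN]
  rw [if_neg hN, if_neg hN]
  have hfold :
      (PySem.List.pyRange 0 (grid.length : Int) 1).foldl (fun st i =>
        (PySem.List.pyRange 0 ((grid.headD []).length : Int) 1).foldl (fun (st : Int × List (List Bool)) j =>
          if ! pvCell st.2 i.toNat j.toNat then
            ((if (pvSearch grid (grid.length * (grid.headD []).length) i j st.2 1).1 > st.1 then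
                (pvSearch grid (grid.length * (grid.headD []).length) i j st.2 1).1 else st.1),
              (pvSearch grid (grid.length * (grid.headD []).length) i j st.2 1).2)
          else st) st)
        ((0 : Int), List.replicate grid.length (List.replicate (grid.headD []).length false))
      = (PySem.List.pyRange 0 (grid.length : Int) 1).foldl (fun st i =>
        (PySem.List.pyRange 0 ((grid.headD []).length : Int) 1).foldl (fun (st : Int × List (List Bool)) j =>
          if ! pvCell st.2 i.toNat j.toNat then
            (max st.1 (pvFlood grid (pvVal grid i.toNat j.toNat) [(i, j)] st.2 0).1,
              (pvFlood grid (pvVal grid i.toNat j.toNat) [(i, j)] st.2 0).2)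
          else st) st)
        ((0 : Int), List.replicate grid.length (List.replicate (grid.headD []).length false)) := by
    apply pvFoldl_congr_inv (fun st : Int × List (List Bool) => pvShape grid st.2)
    · constructor
      · simp
      · intro r hr
        rw [List.eq_of_mem_replicate hr]
        simp
    · -- outer invariant preservation
      intro st i hi hP
      apply pvFoldl_inv (fun st : Int × List (List Bool) => pvShape grid st.2) _ _ _ hP
      intro st j hj hPs
      by_cases hc : pvCell st.2 i.toNat j.toNat
      · simpa [hc] using hPs
      · rw [Bool.not_eq_true] at hc
        simp only [hc, Bool.not_false, if_true]
        rw [PySem.List.mem_pyRange_one] at hi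
        exact pvSearch_shape grid _ i j st.2 1 hPs (by rw [hPs.1]; omega)
    · -- outer congruence
      intro st i hi hP
      apply pvFoldl_congr_inv (fun st : Int × List (List Bool) => pvShape grid st.2) _ _ _ _ hP
      · intro st j hj hPs
        by_cases hc : pvCell st.2 i.toNat j.toNat
        · simpa [hc] using hPs
        · rw [Bool.not_eq_true] at hc
          simp only [hc, Bool.not_false, if_true]
          rw [PySem.List.mem_pyRange_one] at hi
          exact pvSearch_shape grid _ i j st.2 1 hPs (by rw [hPs.1]; omega)
      · intro st j hj hPs
        by_cases hc : pvCell st.2 i.toNat j.toNat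
        · simp [hc]
        · rw [Bool.not_eq_true] at hc
          simp only [hc, Bool.not_false, if_true]
          rw [PySem.List.mem_pyRange_one] at hi hj
          have hcm : pvCanMove grid i j st.2 (pvVal grid i.toNat j.toNat) = true :=
            pvCanMove_intro (by omega) (by omega) (by omega) (by omega) hc rfl
          have hb := pvFlood_search grid (pvVal grid i.toNat j.toNat) (pvCF st.2) st.2 le_rfl hPs
            i j hcm (grid.length * (grid.headD []).length) (pvCF_le_size grid st.2 hPs) [] 0
          rw [pvFlood_nil] at hb
          rw [hb]
          dsimp only
          have h01 : (0 : Int) + 1 = 1 := by norm_num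
          rw [h01]
          by_cases hlt : st.1 < (pvSearch grid (grid.length * (grid.headD []).length) i j st.2 1).1
          · rw [if_pos hlt, max_eq_right hlt.le]
          · rw [if_neg hlt, max_eq_left (not_lt.mp hlt)]
  exact congrArg Prod.fst hfold
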